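-- pv_equiv track=rewrite | github.com/contextuai/contextuai-solo | backend/services/workspace/workshop_compiler.py | _group_by_agent
-- ===== SOURCE A (Python) =====
-- from typing import Dict, Any, List, Optional
--
-- def _group_by_agent(
--     contributions: List[Dict[str, Any]]
-- ) -> Dict[str, List[Dict[str, Any]]]:
--     """
--     Group contributions by agent name.
--
--     Args:
--         contributions: List of contribution dicts
--
--     Returns:
--         Dict mapping agent_name to list of contributions
--     """
--     grouped: Dict[str, List[Dict[str, Any]]] = {}
--     for contrib in contributions:
--         agent_name = contrib.get("agent_name", "Unknown Agent")
--         if agent_name not in grouped: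
--             grouped[agent_name] = []
--         grouped[agent_name].append(contrib)
--     return grouped
-- ===== SOURCE B (Python) =====
-- def _group_by_agent(contributions):
--     keys = [c.get("agent_name", "Unknown Agent") for c in contributions]
--     return {
--         k: [c for c, kk in zip(contributions, keys) if kk == k]
--         for k in dict.fromkeys(keys)
--     }
-- ===== Notes on version B (the rewrite author's own statement) =====
-- stated objective: alternative
-- what changed: Replaces A's single-pass dict-of-lists accumulation by a two-pass decomposition: compute every contribution's key first, take the keys' first-occurrence dedup as the group order, then build each group by filtering the zipped (contribution, key) list per distinct key.
import Mathlib
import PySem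

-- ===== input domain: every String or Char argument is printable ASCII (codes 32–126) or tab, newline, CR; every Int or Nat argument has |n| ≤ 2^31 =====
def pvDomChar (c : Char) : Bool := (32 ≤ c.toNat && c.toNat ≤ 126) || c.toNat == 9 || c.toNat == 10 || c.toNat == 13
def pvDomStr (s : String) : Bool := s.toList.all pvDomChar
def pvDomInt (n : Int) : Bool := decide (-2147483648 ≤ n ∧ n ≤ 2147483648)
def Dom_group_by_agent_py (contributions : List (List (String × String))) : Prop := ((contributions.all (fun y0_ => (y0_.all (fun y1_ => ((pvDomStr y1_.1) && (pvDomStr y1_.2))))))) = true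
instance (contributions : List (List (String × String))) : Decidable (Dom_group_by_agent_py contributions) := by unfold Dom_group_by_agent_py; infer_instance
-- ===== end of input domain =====

-- B replaces A's single-pass dict-of-lists accumulation by a two-pass decomposition
-- (compute all keys, dedup them in first-occurrence order, then collect each group by
-- one scan per distinct key); objective: alternative (same result, different traversal).

-- contrib.get("agent_name", "Unknown Agent")
def pvKeyOf (c : List (String × String)) : String :=
  (PySem.Dict.mk c).getD "agent_name" "Unknown Agent"

-- ===== PORT A =====
def group_by_agent_py (contributions : List (List (String × String))) : List (String × List (List (String × String))) :=
  (contributions.foldl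
    (fun grouped contrib =>
      let agent_name := pvKeyOf contrib
      let grouped := if grouped.contains agent_name then grouped else grouped.insert agent_name []
      grouped.modify agent_name [] (fun l => l ++ [contrib]))
    PySem.Dict.empty).items

-- ===== PORT B =====
def group_by_agent_py_alt (contributions : List (List (String × String))) : List (String × List (List (String × String))) :=
  let keys := contributions.map pvKeyOf
  (PySem.List.dedup keys).map (fun k =>
    (k, ((contributions.zip keys).filter (fun p => p.2 == k)).map Prod.fst))

-- ===== PRECONDITION & SPEC =====
def Spec_group_by_agent_py (contributions : List (List (String × String))) (out : List (String × List (List (String × String)))) : Prop := out = group_by_agent_py_alt contributions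
instance (contributions : List (List (String × String))) (out : List (String × List (List (String × String)))) : Decidable (Spec_group_by_agent_py contributions out) := by unfold Spec_group_by_agent_py; infer_instance

-- ===== CLAIM (what is proved, stated in full; the proofs are below) =====
def Claim_equal_group_by_agent_py : Prop := ∀ (contributions : List (List (String × String))), Dom_group_by_agent_py contributions → Spec_group_by_agent_py contributions (group_by_agent_py contributions)

-- ===== LEMMAS AND PROOFS =====

-- zipping a list with its own keys and keeping the pairs whose key is k is filtering by key
theorem pv_zip_filter_fst {α : Type} (l : List α) (f : α → String) (k : String) :
    ((l.zip (l.map f)).filter (fun p => p.2 == k)).map Prod.fst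
      = l.filter (fun c => f c == k) := by
  induction l with
  | nil => rfl
  | cons c t ih =>
    simp only [List.map_cons, List.zip_cons_cons, List.filter_cons]
    by_cases h : f c == k
    · simp [h, ih]
    · simp only [h] at *
      simpa using ih

-- inserting an empty group and immediately overwriting it equals a plain modify-append
theorem pv_insert_insert {κ ν : Type} [BEq κ] [LawfulBEq κ] [DecidableEq κ] (g : PySem.Dict κ ν) (k : κ)
    (v w : ν) (h : g.contains k = false) :
    (g.insert k v).insert k w = g.insert k w := by
  apply PySem.Dict.ext
  rw [PySem.Dict.items_insert, PySem.Dict.items_insert_of_not_contains _ _ h,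
      PySem.Dict.items_insert_of_not_contains _ _ h]
  simp only [PySem.Dict.contains_insert_self, if_true, List.map_append, List.map_cons,
    List.map_nil, beq_self_eq_true]
  congr 1
  apply List.map_congr_left ?_ |>.trans (List.map_id _)
  intro p hp
  have hk : p.1 ≠ k := by
    intro e
    have := PySem.Dict.mem_keys_of_mem_items (d := g) hp
    rw [PySem.Dict.contains_eq_decide_mem_keys] at h
    simp [← e, this] at h
  simp [hk]

-- A's guarded step (insert [] if missing, then append) is a plain modify-append step
theorem pv_step_eq (g : PySem.Dict String (List (List (String × String)))) (c : List (String × String)) :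
    (let agent_name := pvKeyOf c
     let grouped := if g.contains agent_name then g else g.insert agent_name []
     grouped.modify agent_name [] (fun l => l ++ [c]))
      = g.modify (pvKeyOf c) [] (fun l => l ++ [c]) := by
  by_cases h : g.contains (pvKeyOf c)
  · simp [h]
  · have h' : g.contains (pvKeyOf c) = false := eq_false_of_ne_true h
    simp [h', PySem.Dict.modify, PySem.Dict.getD_insert_self,
      PySem.Dict.getD_of_not_contains _ _ h']
    exact pv_insert_insert _ _ _ _ h'

-- a dict with nodup keys is exactly its key list paired with its lookups
theorem pv_items_eq_keys_map {κ ν : Type} [BEq κ] [LawfulBEq κ]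
    (d : PySem.Dict κ ν) (d0 : ν) (h : d.keys.Nodup) :
    d.items = d.keys.map (fun k => (k, d.getD k d0)) := by
  apply List.ext_getElem
  · simp [PySem.Dict.keys]
  · intro i h1 h2
    simp only [PySem.Dict.keys, List.getElem_map]
    have hm : d.items[i] ∈ d.items := List.getElem_mem _
    have := PySem.Dict.getD_of_mem_items (d := d)
      (k := d.items[i].1) (v := d.items[i].2) (by simp) h d0
    rw [this]

theorem pv_foldA_eq (contributions : List (List (String × String))) :
    group_by_agent_py contributions
      = (contributions.foldl
          (fun g c => g.modify (pvKeyOf c) [] (fun l => l ++ [c])) PySem.Dict.empty).items := by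
  unfold group_by_agent_py
  have hf : (fun (grouped : PySem.Dict String (List (List (String × String)))) contrib =>
      let agent_name := pvKeyOf contrib
      let grouped := if grouped.contains agent_name then grouped else grouped.insert agent_name []
      grouped.modify agent_name [] (fun l => l ++ [contrib]))
        = (fun g c => g.modify (pvKeyOf c) [] (fun l => l ++ [c])) := by
    funext g c
    exact pv_step_eq g c
  rw [hf]

-- ===== VERDICT (by name: the statement is the Claim_ definition above) =====
theorem group_by_agent_py_spec : Claim_equal_group_by_agent_py := by
  intro contributions _
  show group_by_agent_py contributions = group_by_agent_py_alt contributions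
  rw [pv_foldA_eq]
  set d := contributions.foldl (fun g c => g.modify (pvKeyOf c) [] (fun l => l ++ [c]))
    PySem.Dict.empty with hd
  have hkeys : d.keys = PySem.List.dedup (contributions.map pvKeyOf) := by
    rw [hd, PySem.Dict.keys_foldl_modify_key contributions pvKeyOf [] (fun _ x v => v ++ [x])]
    rw [PySem.List.dedup_eq_ofList]
    simp [PySem.Dict.keys_empty, PySem.Set.update_nil_left]
  have hnodup : d.keys.Nodup := by
    rw [hd]
    exact PySem.Dict.nodup_keys_foldl_modify_key contributions pvKeyOf [] (fun _ x v => v ++ [x])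
      _ (by simp [PySem.Dict.keys_empty])
  have hget : ∀ k, d.getD k [] = contributions.filter (fun c => pvKeyOf c == k) := by
    intro k
    have hmap : d = (contributions.map (fun c => (pvKeyOf c, c))).foldl
        (fun g p => g.modify p.1 [] (fun l => l ++ [p.2])) PySem.Dict.empty := by
      rw [hd, List.foldl_map]
    rw [hmap, PySem.Dict.getD_foldl_modify_append]
    simp [List.filter_map, List.map_map, Function.comp_def]
  rw [pv_items_eq_keys_map d [] hnodup, hkeys]
  unfold group_by_agent_py_alt
  apply List.map_congr_left
  intro k _
  rw [hget k, pv_zip_filter_fst]
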